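-- pv_equiv track=rewrite | github.com/DannyLee12/dcp | _2020/06_June/106.py | hoppable_reverse
-- ===== SOURCE A (Python) =====
-- def hoppable_reverse(l: list) -> bool:
--     """Consider working from the end of the list"""
--     # For [i, j, k, x], i >= 3, j >= 2, k >= 1, then
--     # Recursively check the next block, using backtracking
--     n = len(l)
--     if n == 1:
--         return True
--     for i, x in enumerate(reversed(l[:-1])):
--         if x == 1 + i:
--             if hoppable_reverse(l[:n - i - 1]):
--                 return True
--     return False
-- ===== SOURCE B (Python) =====
-- def hoppable_reverse(l: list) -> bool:
--     n = len(l)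
--     pos = 0
--     while pos < n - 1:
--         step = l[pos]
--         if step <= 0:
--             return False
--         pos += step
--     return pos == n - 1
-- ===== Notes on version B (the rewrite author's own statement) =====
-- stated objective: faster
-- what changed: Replaces A's exponential backtracking recursion over reversed prefixes (with list slicing at each level) by a single deterministic forward walk pos += l[pos] from index 0, which is exact because every accepted jump must land precisely on the target, making the successor of each position unique.
import Mathlib
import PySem

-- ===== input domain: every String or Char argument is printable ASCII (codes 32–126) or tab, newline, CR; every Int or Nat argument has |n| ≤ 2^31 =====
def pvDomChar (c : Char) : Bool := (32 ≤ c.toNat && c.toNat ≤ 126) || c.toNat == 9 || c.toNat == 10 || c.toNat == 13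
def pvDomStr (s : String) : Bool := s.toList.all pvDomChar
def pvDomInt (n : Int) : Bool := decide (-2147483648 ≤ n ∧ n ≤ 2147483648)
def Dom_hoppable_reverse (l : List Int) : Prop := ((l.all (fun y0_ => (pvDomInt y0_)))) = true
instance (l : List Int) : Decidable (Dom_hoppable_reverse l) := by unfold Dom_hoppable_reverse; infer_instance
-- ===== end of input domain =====

-- B replaces A's exponential backtracking over reversed prefixes by one deterministic
-- forward walk pos += l[pos] (exact: each accepted jump must land precisely on its target,
-- so the successor of a position is unique); objective: faster (asymptotic).

-- ===== PORT A =====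
-- literal transliteration of A: recursion on slices l[:n-i-1], scanning enumerate(reversed(l[:-1]))
-- with early-return 'any' (the Python loop returns True at the first hit and False after the loop).
def hoppable_reverse (l : List Int) : Bool :=
  if l.length == 1 then true
  else
    ((PySem.List.enumerate (PySem.List.slice l none (some (-1))).reverse 0).attach.any
      (fun p => p.1.2 == 1 + p.1.1 &&
        hoppable_reverse (PySem.List.slice l none (some ((l.length : Int) - p.1.1 - 1)))))
termination_by l.length
decreasing_by
  have hm := p.2
  simp only [PySem.List.slice_to_neg_one, PySem.List.mem_enumerate_iff] at hm
  obtain ⟨k, hk, hp⟩ := hm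
  simp [List.length_reverse, List.length_dropLast] at hk
  have : p.1.1 = (0:Int) + k := by rw [hp]
  rw [this]
  have hb : (0:Int) ≤ (l.length : Int) - ((0:Int)+k) - 1 := by omega
  rw [PySem.List.slice_to _ hb]
  simp [List.length_take]
  omega

-- ===== PORT B =====
-- literal transliteration of B's while loop: pos < n-1 → read l[pos], bail out on step ≤ 0,
-- else advance; afterwards return pos == n-1.  The 'none' arm is unreachable (pos < n-1).
def hrChase (l : List Int) (pos : Nat) : Bool :=
  if _h : (pos : Int) < (l.length : Int) - 1 then
    match l[pos]? with
    | some step => if _hs : step ≤ 0 then false else hrChase l (pos + step.toNat)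
    | none => false
  else (pos : Int) == (l.length : Int) - 1
termination_by l.length - pos
decreasing_by
  have : pos + 1 < l.length := by omega
  omega

def hoppable_reverse_alt (l : List Int) : Bool := hrChase l 0

-- ===== PRECONDITION & SPEC =====
def Spec_hoppable_reverse (l : List Int) (out : Bool) : Prop := out = hoppable_reverse_alt l
instance (l : List Int) (out : Bool) : Decidable (Spec_hoppable_reverse l out) := by unfold Spec_hoppable_reverse; infer_instance

-- ===== CLAIM (what is proved, stated in full; the proofs are below) =====
def Claim_equal_hoppable_reverse : Prop := ∀ (l : List Int), Dom_hoppable_reverse l → Spec_hoppable_reverse l (hoppable_reverse l)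

-- ===== LEMMAS AND PROOFS =====

-- p is reachable from a by repeatedly jumping pos += l[pos] with positive steps.
inductive ReachFrom (l : List Int) : Nat → Nat → Prop
  | refl (p : Nat) : ReachFrom l p p
  | cons (p q : Nat) (s : Int) (h : l[p]? = some s) (hs : 0 < s)
      (ht : ReachFrom l (p + s.toNat) q) : ReachFrom l p q

theorem reach_le {l : List Int} {a b : Nat} (h : ReachFrom l a b) : a ≤ b := by
  induction h with
  | refl => omega
  | cons p q s h hs ht ih => omega

theorem reach_snoc {l : List Int} {a b : Nat} {s : Int} (h : ReachFrom l a b)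
    (hb : l[b]? = some s) (hs : 0 < s) : ReachFrom l a (b + s.toNat) := by
  induction h with
  | refl p => exact ReachFrom.cons p _ s hb hs (ReachFrom.refl _)
  | cons p q s' h' hs' ht ih => exact ReachFrom.cons p _ s' h' hs' (ih hb)

theorem reach_last {l : List Int} {a b : Nat} (h : ReachFrom l a b) :
    a = b ∨ ∃ p s, ReachFrom l a p ∧ l[p]? = some s ∧ 0 < s ∧ p + s.toNat = b := by
  induction h with
  | refl p => exact Or.inl rfl
  | cons p q s h hs ht ih =>
    rcases ih with rfl | ⟨p', s', hr, hg, hs', hq⟩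
    · exact Or.inr ⟨p, s, ReachFrom.refl p, h, hs, rfl⟩
    · exact Or.inr ⟨p', s', ReachFrom.cons p _ s h hs hr, hg, hs', hq⟩

theorem reach_of_take {l : List Int} {m a c : Nat} (h : ReachFrom (l.take m) a c) :
    ReachFrom l a c := by
  induction h with
  | refl p => exact ReachFrom.refl p
  | cons p q s hg hs ht ih =>
    have hp : p < m := by
      by_contra hge
      rw [List.getElem?_eq_none (by simp [List.length_take]; omega)] at hg
      simp at hg
    have : l[p]? = some s := by
      rw [List.getElem?_take_of_lt hp] at hg; exact hg
    exact ReachFrom.cons p q s this hs ih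

theorem take_of_reach {l : List Int} {b a c : Nat} (h : ReachFrom l a c) (hc : c ≤ b) :
    ReachFrom (l.take (b+1)) a c := by
  induction h with
  | refl p => exact ReachFrom.refl p
  | cons p q s hg hs ht ih =>
    have hle : p + s.toNat ≤ q := reach_le ht
    have hp : p < b + 1 := by omega
    exact ReachFrom.cons p q s (by rw [List.getElem?_take_of_lt hp]; exact hg) hs (ih hc)

-- characterisation of B's walk
theorem chase_reach {l : List Int} {pos : Nat} (h : hrChase l pos = true) (hl : 1 ≤ l.length) :
    ReachFrom l pos (l.length - 1) := by
  fun_induction hrChase l pos with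
  | case1 pos _h step hg _hs => simp at h
  | case2 pos _h step hg _hs ih =>
    exact ReachFrom.cons _ _ step hg (by omega) (ih h)
  | case3 pos _h hg => simp at h
  | case4 pos _h =>
    have : pos = l.length - 1 := by
      simp at h; omega
    rw [this]; exact ReachFrom.refl _

theorem reach_chase {l : List Int} {pos : Nat} (h : ReachFrom l pos (l.length - 1))
    (hl : 1 ≤ l.length) : hrChase l pos = true := by
  generalize hq : l.length - 1 = q at h
  induction h with
  | refl p =>
    rw [hrChase, dif_neg (by omega)]
    simp; omega
  | cons p q s hg hs ht ih =>
    by_cases hp : (p : Int) < (l.length : Int) - 1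
    · rw [hrChase, dif_pos hp, hg]
      simp only
      rw [dif_neg (by omega)]
      exact ih hq
    · have hlt : p < l.length := by
        by_contra hge
        rw [List.getElem?_eq_none (by omega)] at hg; simp at hg
      rw [hrChase, dif_neg hp]
      simp; omega

theorem chase_iff (l : List Int) (hl : 1 ≤ l.length) (pos : Nat) :
    hrChase l pos = true ↔ ReachFrom l pos (l.length - 1) :=
  ⟨fun h => chase_reach h hl, fun h => reach_chase h hl⟩

-- characterisation of one unfolding of A
theorem Achar (l : List Int) : hoppable_reverse l = true ↔
    (l.length = 1 ∨ ∃ pos : Nat, pos + 1 < l.length ∧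
      l[pos]? = some ((l.length : Int) - 1 - pos) ∧ hoppable_reverse (l.take (pos+1)) = true) := by
  rw [hoppable_reverse]
  by_cases h1 : l.length = 1
  · simp [h1]
  · rw [if_neg (by simpa using h1)]
    simp only [List.any_eq_true, List.mem_attach, true_and, Subtype.exists,
      PySem.List.slice_to_neg_one, PySem.List.mem_enumerate_iff, Bool.and_eq_true, beq_iff_eq]
    constructor
    · rintro ⟨a, ⟨k, hk, rfl⟩, hx, hrec⟩
      simp only [List.length_reverse, List.length_dropLast] at hk
      have hn2 : 2 ≤ l.length := by omega
      refine Or.inr ⟨l.length - 2 - k, by omega, ?_, ?_⟩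
      · have hlt : l.length - 2 - k < l.length := by omega
        rw [List.getElem?_eq_getElem hlt]
        have hrv : l.dropLast.reverse[k] = l[l.length - 2 - k] := by
          rw [List.getElem_reverse]
          rw [List.getElem_dropLast]
          congr 1
          simp [List.length_dropLast]
          omega
        simp only at hx
        rw [← hrv, hx]
        congr 1
        omega
      · have harg : PySem.List.slice l none (some ((l.length : Int) - (0 + (k:Int)) - 1))
            = l.take (l.length - 2 - k + 1) := by
          rw [PySem.List.slice_to _ (by omega)]
          congr 1
          omega
        rw [← harg]
        exact hrec
    · rintro (h1' | ⟨pos, hpos, hget, hrec⟩)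
      · exact absurd h1' h1
      · have hn2 : 2 ≤ l.length := by omega
        set k := l.length - 2 - pos with hkdef
        have hk : k < l.dropLast.reverse.length := by
          simp [List.length_reverse, List.length_dropLast]; omega
        have hrv : l.dropLast.reverse[k] = l[pos]'(by omega) := by
          rw [List.getElem_reverse]
          rw [List.getElem_dropLast]
          congr 1
          simp [List.length_dropLast]
          omega
        refine ⟨(0 + (k:Int), l.dropLast.reverse[k]), ⟨k, hk, rfl⟩, ?_, ?_⟩
        · simp only
          rw [hrv]
          rw [List.getElem?_eq_getElem (by omega : pos < l.length)] at hget
          have := Option.some.inj hget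
          rw [this]
          omega
        · have harg : PySem.List.slice l none (some ((l.length : Int) - (0 + (k:Int)) - 1))
              = l.take (pos + 1) := by
            rw [PySem.List.slice_to _ (by omega)]
            congr 1
            omega
          rw [harg]
          exact hrec

theorem A_iff_reach (l : List Int) : hoppable_reverse l = true ↔
    (1 ≤ l.length ∧ ReachFrom l 0 (l.length - 1)) := by
  generalize hn : l.length = n
  induction n using Nat.strong_induction_on generalizing l with
  | _ n ih =>
  rw [Achar]
  constructor
  · rintro (h1 | ⟨pos, hpos, hget, hrec⟩)
    · refine ⟨by omega, ?_⟩
      have h0 : n - 1 = 0 := by omega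
      rw [h0]; exact ReachFrom.refl 0
    · have hlen : (l.take (pos+1)).length = pos + 1 := by
        simp [List.length_take]; omega
      have hsub := (ih (pos+1) (by omega) (l.take (pos+1)) hlen).1 hrec
      obtain ⟨-, hr⟩ := hsub
      simp only [Nat.add_sub_cancel] at hr
      have hr' : ReachFrom l 0 pos := reach_of_take (by simpa using hr)
      have hstep := reach_snoc hr' hget (by omega)
      refine ⟨by omega, ?_⟩
      have heq : pos + ((l.length : Int) - 1 - (pos:Int)).toNat = n - 1 := by omega
      rw [heq] at hstep
      exact hstep
  · rintro ⟨hl, hr⟩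
    by_cases h1 : l.length = 1
    · exact Or.inl h1
    · rcases reach_last hr with h0 | ⟨p, s, hrp, hg, hs, hq⟩
      · omega
      · have hpn : p + 1 < l.length := by omega
        have hs' : s = (l.length : Int) - 1 - p := by omega
        have hlen : (l.take (p+1)).length = p + 1 := by
          simp [List.length_take]; omega
        have htk : ReachFrom (l.take (p+1)) 0 p := take_of_reach hrp (by omega)
        have hA := (ih (p+1) (by omega) (l.take (p+1)) hlen).2
          ⟨by omega, by simpa using htk⟩
        exact Or.inr ⟨p, hpn, by rw [hg, hs'], hA⟩

-- ===== VERDICT (by name: the statement is the Claim_ definition above) =====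
theorem hoppable_reverse_spec : Claim_equal_hoppable_reverse := by
  intro l _
  unfold Spec_hoppable_reverse hoppable_reverse_alt
  rcases Nat.eq_zero_or_pos l.length with h0 | h1
  · have hA : hoppable_reverse l = false := by
      cases hb : hoppable_reverse l with
      | false => rfl
      | true => have := ((A_iff_reach l).1 hb).1; omega
    have hB : hrChase l 0 = false := by
      rw [hrChase, dif_neg (by omega)]
      simp; omega
    rw [hA, hB]
  · rw [Bool.eq_iff_iff, A_iff_reach, chase_iff l h1]
    constructor
    · exact fun h => h.2
    · exact fun h => ⟨h1, h⟩
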